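-- pv_equiv track=rewrite | github.com/basictask/ComputerSecurity | ex/ex2.py | encrypt_with_mul2
-- ===== SOURCE A (Python) =====
-- def fillupbyte(s, padn = 8, padchar = '0', mode = 'l'):
--      n = len(s)
--      l = n
--      while(l % padn != 0):
--          l += 1
--      result = ''
--      j = 0
--      for i in range(l):
--          if(i < l-n):
--              if(mode == 'l'):
--                  result = padchar + result
--              else:
--                  result = result  + padchar
--          else:
--              if(mode == 'l'):
--                  result = result + s[j]
--                  j += 1
--              else:
--                  result = s[::-1][j] + result
--                  j += 1
--      return result
--
-- def bin_xor(s, k):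
--     bin_s = bin(ord(s))[2:]
--     bin_k = str(bin(k)[2:])
--
--     maxlen = max(len(bin_s), len(bin_k))
--     while(maxlen % 8 != 0):
--         maxlen += 1
--
--     bin_s = fillupbyte(bin_s, padn = maxlen)
--     bin_k = fillupbyte(bin_k, padn = maxlen)
--
--     result = ''
--     for i in range(maxlen):
--         if(bin_s[i] == bin_k[i]):
--             result = result + '0'
--         else:
--             result = result + '1'
--
--     result = chr(int(result, 2))
--     return result
--
-- def encrypt_with_mul2(s, k, mode):
--     """
--     >>> encrypt_with_mul2('Hello',34,'encrypt')
--     'j!ä|O'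
--     >>> encrypt_with_mul2('Hello2',131,'encrypt')
--     'Ëc`t_R'
--     >>> encrypt_with_mul2(encrypt_with_mul2('Hello',123,'encrypt'),123,'decrypt')
--     'Hello'
--     >>> encrypt_with_mul2(encrypt_with_mul2('Cryptography',10,'encrypt'),10,'decrypt')
--     'Cryptography'
--     """
--     result = ''
--     l_s = len(s)
--     xor_mul = 2
--     for i in range(l_s):
--         if(i > 0):
--             if(k == 0 or k == 1):
--                 if(mode == 'encrypt'):
--                     k = ord(s[i-1])
--                 elif(mode == 'decrypt'):
--                     k = ord(result[i-1])
--
--         if(i == 0):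
--             result = result + bin_xor(s[i], k)
--         else:
--             k = k * xor_mul % 256
--             result = result + bin_xor(s[i], k)
--
--     return result
-- ===== SOURCE B (Python) =====
-- def encrypt_with_mul2(s, k, mode):
--     out = []
--     for i, ch in enumerate(s):
--         if i == 0:
--             out.append(chr(ord(ch) ^ k))
--         else:
--             if k == 0 or k == 1:
--                 if mode == 'encrypt':
--                     k = ord(s[i - 1])
--                 elif mode == 'decrypt':
--                     k = ord(out[i - 1])
--             k = k * 2 % 256
--             out.append(chr(ord(ch) ^ k))
--     return ''.join(out)
-- ===== Notes on version B (the rewrite author's own statement) =====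
-- stated objective: faster
-- what changed: Replaces the whole fillupbyte/bin_xor binary-string machinery (building, byte-padding and bitwise-comparing '0'/'1' strings, then re-parsing with int(..,2)) by one native integer XOR per character, and builds the output with a list + join instead of quadratic string concatenation.
-- outside the precondition, e.g. on encrypt_with_mul2('Hi', -3, 'encrypt'): A returns 'O\x93', B raises ValueError; on encrypt_with_mul2('A', 1114177, 'encrypt'): A raises ValueError, B raises ValueError
import Mathlib
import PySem

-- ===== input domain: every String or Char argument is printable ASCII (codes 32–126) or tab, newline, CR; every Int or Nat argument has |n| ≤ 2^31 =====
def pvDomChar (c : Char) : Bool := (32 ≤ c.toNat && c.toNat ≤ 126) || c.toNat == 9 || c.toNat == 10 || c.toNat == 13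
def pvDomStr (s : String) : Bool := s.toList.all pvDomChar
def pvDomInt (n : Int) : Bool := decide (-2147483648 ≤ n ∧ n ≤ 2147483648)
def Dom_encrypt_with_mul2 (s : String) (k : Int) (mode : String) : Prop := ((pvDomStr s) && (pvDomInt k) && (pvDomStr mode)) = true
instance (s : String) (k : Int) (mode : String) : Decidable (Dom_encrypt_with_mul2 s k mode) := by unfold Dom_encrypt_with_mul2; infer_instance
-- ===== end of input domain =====

-- B replaces A's per-character binary-string build/pad/compare XOR machinery by one native integer
-- XOR per character (objective: faster, in a timing run). Equivalence is about the return value.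

-- ===== PORT A =====

-- 'while l % padn != 0: l += 1' — the fuel only makes the loop total: 'fuel' ≥ padn suffices for
-- every call reached here (at most padn-1 increments when 0 < padn), so the port is exact there.
def pvWhileFill (fuel : Nat) (l : Nat) (padn : Nat) : Nat :=
  match fuel with
  | 0 => l
  | f + 1 => if l % padn ≠ 0 then pvWhileFill f (l + 1) padn else l

def fillupbyte (s : List Char) (padn : Nat) (padchar : Char) (mode : List Char) : List Char :=
  let n := s.length
  let l := pvWhileFill padn n padn
  let st := (PySem.List.pyRange 0 (l : Int) 1).foldl (fun (st : List Char × Nat) i =>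
    let result := st.1
    let j := st.2
    if i < (l : Int) - (n : Int) then
      if mode == ['l'] then (padchar :: result, j) else (result ++ [padchar], j)
    else
      if mode == ['l'] then (result ++ [PySem.List.pyGetD s (j : Int) ' '], j + 1)
      -- s[::-1] is exactly List.reverse
      else (PySem.List.pyGetD s.reverse (j : Int) ' ' :: result, j + 1)) ([], 0)
  st.1

def bin_xor (sc : Char) (k : Int) : Char :=
  -- bin(x)[2:]
  let bin_s := PySem.List.slice (PySem.Int.toBinChars0b (sc.toNat : Int)) (some 2) none
  let bin_k := PySem.List.slice (PySem.Int.toBinChars0b k) (some 2) none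
  -- 'while maxlen % 8 != 0: maxlen += 1' — fuel 8 suffices (at most 7 increments), so exact
  let maxlen := pvWhileFill 8 (max bin_s.length bin_k.length) 8
  let bs := fillupbyte bin_s maxlen '0' ['l']
  let bk := fillupbyte bin_k maxlen '0' ['l']
  let result := (PySem.List.pyRange 0 (maxlen : Int) 1).foldl (fun r i =>
    if PySem.List.pyGetD bs i ' ' == PySem.List.pyGetD bk i ' ' then r ++ ['0'] else r ++ ['1']) []
  -- int(result, 2): 'result' consists of '0'/'1' only, so a plain binary fold is exact here;
  -- chr(v): Char.ofNat (Python raises for v ≥ 0x110000 — excluded by Pre_)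
  Char.ofNat (result.foldl (fun a c => 2 * a + (if c == '1' then 1 else 0)) 0)

def encrypt_with_mul2 (s : String) (k : Int) (mode : String) : String :=
  let ss := s.toList
  let l_s := ss.length
  let xor_mul : Int := 2
  let st := (PySem.List.pyRange 0 (l_s : Int) 1).foldl (fun (st : List Char × Int) i =>
    let result := st.1
    let k := st.2
    let k := if 0 < i ∧ (k = 0 ∨ k = 1) then
        (if mode == "encrypt" then ((PySem.List.pyGetD ss (i - 1) ' ').toNat : Int)
         else if mode == "decrypt" then ((PySem.List.pyGetD result (i - 1) ' ').toNat : Int)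
         else k)
      else k
    if i = 0 then (result ++ [bin_xor (PySem.List.pyGetD ss i ' ') k], k)
    else
      let k := PySem.Int.mod (k * xor_mul) 256
      (result ++ [bin_xor (PySem.List.pyGetD ss i ' ') k], k)) ([], k)
  String.ofList st.1

-- ===== PORT B =====

def encrypt_with_mul2_alt (s : String) (k : Int) (mode : String) : String :=
  let ss := s.toList
  let st := (PySem.List.enumerate ss).foldl (fun (st : List Char × Int) p =>
    let out := st.1
    let k := st.2
    let i := p.1
    let ch := p.2
    if i = 0 then
      -- chr(ord(ch) ^ k): Char.ofNat of the Python-exact integer XOR (Python raises on chr of a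
      -- negative or ≥ 0x110000 value — excluded by Pre_)
      (out ++ [Char.ofNat (PySem.Int.bxor (ch.toNat : Int) k).toNat], k)
    else
      let k := if k = 0 ∨ k = 1 then
          (if mode == "encrypt" then ((PySem.List.pyGetD ss (i - 1) ' ').toNat : Int)
           else if mode == "decrypt" then ((PySem.List.pyGetD out (i - 1) ' ').toNat : Int)
           else k)
        else k
      let k := PySem.Int.mod (k * 2) 256
      (out ++ [Char.ofNat (PySem.Int.bxor (ch.toNat : Int) k).toNat], k)) ([], k)
  String.ofList st.1

-- ===== PRECONDITION & SPEC =====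

-- Pre_ excludes (a) NEGATIVE k, on which A still RETURNS a value: bin(k)[2:] leaves the 'b' of the
-- '-0b' prefix in A's bit string and its char-by-char comparison silently turns that 'b' into a set
-- bit, while B's natural chr(ord(s[0]) ^ k) raises ValueError there (chr of a negative int), so B
-- cannot return on those inputs; (b) nonempty s whose first XOR value ord(s[0]) ^ k is ≥ 0x110000,
-- where A itself raises ValueError in chr; and (c) that value being a surrogate code point, where
-- Python returns a lone-surrogate str that is not representable as a Lean Char/String.
def Pre_encrypt_with_mul2 (s : String) (k : Int) (mode : String) : Prop :=
  0 ≤ k ∧ (s.toList = [] ∨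
    ((s.toList.headD ' ').toNat ^^^ k.toNat < 55296 ∨
     (57344 ≤ (s.toList.headD ' ').toNat ^^^ k.toNat ∧ (s.toList.headD ' ').toNat ^^^ k.toNat < 1114112)))
instance (s : String) (k : Int) (mode : String) : Decidable (Pre_encrypt_with_mul2 s k mode) := by
  unfold Pre_encrypt_with_mul2; infer_instance

def pvWitness_encrypt_with_mul2 : String × Int × String := ("Hello", 34, "encrypt")

def Spec_encrypt_with_mul2 (s : String) (k : Int) (mode : String) (out : String) : Prop := out = encrypt_with_mul2_alt s k mode
instance (s : String) (k : Int) (mode : String) (out : String) : Decidable (Spec_encrypt_with_mul2 s k mode out) := by unfold Spec_encrypt_with_mul2; infer_instance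

-- ===== CLAIM (what is proved, stated in full; the proofs are below) =====
def Claim_equal_encrypt_with_mul2 : Prop := ∀ (s : String) (k : Int) (mode : String), Dom_encrypt_with_mul2 s k mode → Pre_encrypt_with_mul2 s k mode → Spec_encrypt_with_mul2 s k mode (encrypt_with_mul2 s k mode)

-- ===== LEMMAS AND PROOFS =====

-- MSB-first list of the low L binary digits of a, as '0'/'1' characters
def natBits (L : Nat) (a : Nat) : List Char :=
  match L with
  | 0 => []
  | L + 1 => natBits L (a / 2) ++ [if a % 2 = 1 then '1' else '0']

theorem natBits_length (L a : Nat) : (natBits L a).length = L := by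
  induction L generalizing a with
  | zero => rfl
  | succ L ih => simp [natBits, ih]

theorem pvWhileFill_ge (fuel l p : Nat) : l ≤ pvWhileFill fuel l p := by
  induction fuel generalizing l with
  | zero => simp [pvWhileFill]
  | succ f ih =>
    simp only [pvWhileFill]
    split
    · exact le_trans (Nat.le_succ l) (ih (l + 1))
    · exact le_refl l

theorem pvWhileFill_eq (fuel l p : Nat) (hl : 0 < l) (hlp : l ≤ p) (hf : p - l ≤ fuel) :
    pvWhileFill fuel l p = p := by
  induction fuel generalizing l with
  | zero =>
    have : l = p := by omega
    simp [pvWhileFill, this]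
  | succ f ih =>
    simp only [pvWhileFill]
    rcases Nat.lt_or_ge l p with h | h
    · have hmod : l % p = l := Nat.mod_eq_of_lt h
      rw [if_pos (by omega), ih (l + 1) (by omega) (by omega) (by omega)]
    · have : l = p := by omega
      simp [this]

-- the digits Nat.toDigits 2 actually produces, in a structurally recursive form
def pvDigits (n : Nat) : List Char :=
  if h : n / 2 = 0 then [Nat.digitChar (n % 2)]
  else pvDigits (n / 2) ++ [Nat.digitChar (n % 2)]
decreasing_by exact Nat.div_lt_self (by omega) (by omega)

theorem toDigitsCore_eq (fuel n : Nat) (ds : List Char) (h : n < fuel) :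
    Nat.toDigitsCore 2 fuel n ds = pvDigits n ++ ds := by
  induction fuel generalizing n ds with
  | zero => omega
  | succ f ih =>
    rw [Nat.toDigitsCore]
    by_cases h2 : n / 2 = 0
    · rw [if_pos h2, pvDigits, dif_pos h2]; rfl
    · rw [if_neg h2, ih (n / 2) _ (by omega)]
      rw [show pvDigits n = pvDigits (n / 2) ++ [Nat.digitChar (n % 2)] from by rw [pvDigits, dif_neg h2]]
      simp

theorem toDigits_two_eq (n : Nat) : Nat.toDigits 2 n = pvDigits n :=
  by rw [Nat.toDigits, toDigitsCore_eq _ _ _ (Nat.lt_succ_self n), List.append_nil]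

theorem pvDigits_spec (n : Nat) :
    pvDigits n = natBits (pvDigits n).length n ∧ n < 2 ^ (pvDigits n).length ∧ 1 ≤ (pvDigits n).length := by
  induction n using Nat.strong_induction_on with
  | _ n ih =>
    by_cases h2 : n / 2 = 0
    · rw [pvDigits, dif_pos h2]
      have hn : n = 0 ∨ n = 1 := by omega
      rcases hn with h | h <;> subst h <;> simp [natBits, Nat.digitChar]
    · rw [pvDigits, dif_neg h2]
      obtain ⟨ih1, ih2, ih3⟩ := ih (n / 2) (Nat.div_lt_self (by omega) (by omega))
      refine ⟨?_, ?_, ?_⟩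
      · have hlen : (pvDigits (n / 2) ++ [Nat.digitChar (n % 2)]).length = (pvDigits (n / 2)).length + 1 := by
          simp
        rw [hlen, natBits]
        rw [← ih1]
        have : Nat.digitChar (n % 2) = if n % 2 = 1 then '1' else '0' := by
          rcases Nat.mod_two_eq_zero_or_one n with h | h <;> simp [h, Nat.digitChar]
        rw [this]
      · simp only [List.length_append, List.length_cons, List.length_nil]
        have : n < 2 ^ ((pvDigits (n / 2)).length + 1) := by
          rw [pow_succ]
          omega
        simpa using this
      · simp

-- bin(x)[2:] for 0 ≤ x, via the PySem bin
theorem binSlice_nonneg (a : Nat) :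
    PySem.List.slice (PySem.Int.toBinChars0b (a : Int)) (some 2) none = pvDigits a := by
  have h0 : ¬ ((a : Int) < 0) := by omega
  simp only [PySem.Int.toBinChars0b, if_neg h0, Int.toNat_natCast, toDigits_two_eq]
  have : ((2 : Nat) : Int) = (2 : Int) := by norm_num
  rw [← this, PySem.List.slice_from_natCast]
  rfl

theorem natBits_msb (L a : Nat) (h : a < 2 ^ (L + 1)) :
    natBits (L + 1) a = (if a / 2 ^ L = 1 then '1' else '0') :: natBits L a := by
  induction L generalizing a with
  | zero =>
    simp only [natBits, pow_zero, Nat.div_one]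
    interval_cases a <;> simp
  | succ L ih =>
    have hd : a / 2 < 2 ^ (L + 1) := by
      rw [pow_succ] at h
      omega
    show natBits (L + 1) (a / 2) ++ [if a % 2 = 1 then '1' else '0'] = _
    rw [ih (a / 2) hd]
    have hdd : a / 2 / 2 ^ L = a / 2 ^ (L + 1) := by
      rw [Nat.div_div_eq_div_mul, pow_succ']
    rw [hdd]
    rfl

theorem natBits_pad (L M a : Nat) (ha : a < 2 ^ L) (hLM : L ≤ M) :
    natBits M a = List.replicate (M - L) '0' ++ natBits L a := by
  induction M with
  | zero =>
    have : L = 0 := by omega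
    subst this; simp
  | succ M ih =>
    rcases Nat.lt_or_ge M L with h | h
    · have : L = M + 1 := by omega
      subst this; simp
    · have ha' : a < 2 ^ (M + 1) := lt_of_lt_of_le ha (Nat.pow_le_pow_right (by omega) (by omega))
      have hz : a / 2 ^ M = 0 := Nat.div_eq_of_lt (lt_of_lt_of_le ha (Nat.pow_le_pow_right (by omega) h))
      rw [natBits_msb M a ha', hz, ih h]
      have : M + 1 - L = (M - L) + 1 := by omega
      rw [this, List.replicate_succ]
      simp

def fillStep (M : Nat) (xs : List Char) (st : List Char × Nat) (i : Int) : List Char × Nat :=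
  if i < (M : Int) - (xs.length : Int) then ('0' :: st.1, st.2)
  else (st.1 ++ [PySem.List.pyGetD xs (st.2 : Int) ' '], st.2 + 1)

theorem fillStep_loop_pad (M : Nat) (xs : List Char) (is : List Int)
    (h : ∀ i ∈ is, i < (M : Int) - (xs.length : Int)) (acc : List Char) (j : Nat) :
    is.foldl (fillStep M xs) (acc, j) = (List.replicate is.length '0' ++ acc, j) := by
  induction is generalizing acc with
  | nil => simp
  | cons i is ih =>
    simp only [List.foldl_cons]
    have hstep : fillStep M xs (acc, j) i = ('0' :: acc, j) := by
      simp [fillStep, h i (List.mem_cons_self ..)]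
    rw [hstep, ih (fun x hx => h x (List.mem_cons_of_mem _ hx)) ('0' :: acc)]
    simp [List.replicate_succ', List.append_assoc]

theorem fillStep_loop_copy (M : Nat) (xs : List Char) (is : List Int)
    (h : ∀ i ∈ is, ¬ (i < (M : Int) - (xs.length : Int))) (acc : List Char) (j : Nat)
    (hj : j + is.length ≤ xs.length) :
    is.foldl (fillStep M xs) (acc, j) = (acc ++ (xs.drop j).take is.length, j + is.length) := by
  induction is generalizing acc j with
  | nil => simp
  | cons i is ih =>
    simp only [List.foldl_cons, List.length_cons]
    simp only [List.length_cons] at hj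
    have hjlt : j < xs.length := by omega
    have hget : PySem.List.pyGetD xs (j : Int) ' ' = xs[j] := by
      rw [PySem.List.pyGetD_natCast]
      exact List.getD_eq_getElem xs ' ' hjlt
    have hstep : fillStep M xs (acc, j) i = (acc ++ [xs[j]], j + 1) := by
      simp [fillStep, h i (List.mem_cons_self ..), hget]
    rw [hstep, ih (fun x hx => h x (List.mem_cons_of_mem _ hx)) _ (j + 1) (by omega)]
    have hdrop : xs.drop j = xs[j] :: xs.drop (j + 1) := List.drop_eq_getElem_cons hjlt
    rw [hdrop, List.take_succ_cons]
    refine Prod.ext ?_ ?_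
    · simp
    · show j + 1 + is.length = j + (is.length + 1)
      omega

theorem fillup_eq (xs : List Char) (M : Nat) (h1 : 1 ≤ xs.length) (hM : xs.length ≤ M) :
    fillupbyte xs M '0' ['l'] = List.replicate (M - xs.length) '0' ++ xs := by
  unfold fillupbyte
  have hl : pvWhileFill M xs.length M = M := pvWhileFill_eq M xs.length M h1 hM (by omega)
  simp only [hl]
  have hstep : (fun (st : List Char × Nat) i =>
      let result := st.1
      let j := st.2
      if i < (M : Int) - (xs.length : Int) then
        if (['l'] : List Char) == ['l'] then ('0' :: result, j) else (result ++ ['0'], j)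
      else
        if (['l'] : List Char) == ['l'] then (result ++ [PySem.List.pyGetD xs (j : Int) ' '], j + 1)
        else (PySem.List.pyGetD xs.reverse (j : Int) ' ' :: result, j + 1)) = fillStep M xs := by
    funext st i
    simp [fillStep]
  rw [hstep]
  have hsplit : PySem.List.pyRange 0 (M : Int) 1 =
      PySem.List.pyRange 0 ((M : Int) - (xs.length : Int)) 1 ++
      PySem.List.pyRange ((M : Int) - (xs.length : Int)) (M : Int) 1 :=
    PySem.List.pyRange_one_append _ _ _ (by omega) (by omega)
  rw [hsplit, List.foldl_append]
  have hlen1 : (PySem.List.pyRange 0 ((M : Int) - (xs.length : Int)) 1).length = M - xs.length := by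
    rw [PySem.List.length_pyRange_one]
    omega
  have hlen2 : (PySem.List.pyRange ((M : Int) - (xs.length : Int)) (M : Int) 1).length = xs.length := by
    rw [PySem.List.length_pyRange_one]
    omega
  rw [fillStep_loop_pad M xs _ (fun i hi => (PySem.List.mem_pyRange_one.1 hi).2) [] 0]
  rw [fillStep_loop_copy M xs _ (fun i hi => by
        have := (PySem.List.mem_pyRange_one.1 hi).1
        omega) _ 0 (by rw [hlen2]; omega)]
  simp [hlen1, hlen2]

theorem xor_div_two (a b : Nat) : (a ^^^ b) / 2 = a / 2 ^^^ b / 2 := by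
  apply Nat.eq_of_testBit_eq
  intro i
  rw [Nat.testBit_div_two, Nat.testBit_xor, Nat.testBit_xor, Nat.testBit_div_two, Nat.testBit_div_two]

theorem xor_mod_two (a b : Nat) : (a ^^^ b) % 2 = if a % 2 = b % 2 then 0 else 1 := by
  have h : (a ^^^ b).testBit 0 = ((a.testBit 0) ^^ (b.testBit 0)) := Nat.testBit_xor a b 0
  rw [Nat.testBit_zero, Nat.testBit_zero, Nat.testBit_zero] at h
  have hx := Nat.mod_two_eq_zero_or_one (a ^^^ b)
  rcases Nat.mod_two_eq_zero_or_one a with ha | ha <;>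
    rcases Nat.mod_two_eq_zero_or_one b with hb | hb <;>
    simp [ha, hb] at h <;>
    simp [ha, hb] <;> omega

theorem getD_natBits_lo (L a : Nat) (i : Nat) (hi : i < L) :
    PySem.List.pyGetD (natBits (L + 1) a) (i : Int) ' ' = PySem.List.pyGetD (natBits L (a / 2)) (i : Int) ' ' := by
  rw [PySem.List.pyGetD_natCast, PySem.List.pyGetD_natCast]
  rw [List.getD_eq_getElem _ _ (by rw [natBits_length]; omega),
      List.getD_eq_getElem _ _ (by rw [natBits_length]; omega)]
  show (natBits L (a / 2) ++ [if a % 2 = 1 then '1' else '0'])[i]'(by simp [natBits_length]; omega) = _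
  rw [List.getElem_append_left (by rw [natBits_length]; omega)]

theorem getD_natBits_hi (L a : Nat) :
    PySem.List.pyGetD (natBits (L + 1) a) (L : Int) ' ' = (if a % 2 = 1 then '1' else '0') := by
  rw [PySem.List.pyGetD_natCast, List.getD_eq_getElem _ _ (by rw [natBits_length]; omega)]
  show (natBits L (a / 2) ++ [if a % 2 = 1 then '1' else '0'])[L]'(by simp [natBits_length]) = _
  rw [List.getElem_append_right (by simp [natBits_length])]
  simp [natBits_length]

theorem cmp_fold_nat (L a b : Nat) :
    (List.range L).foldl (fun r (i : Nat) =>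
      if PySem.List.pyGetD (natBits L a) (i : Int) ' ' == PySem.List.pyGetD (natBits L b) (i : Int) ' '
      then r ++ ['0'] else r ++ ['1']) []
    = natBits L (a ^^^ b) := by
  induction L generalizing a b with
  | zero => simp [natBits]
  | succ L ih =>
    rw [List.range_succ, List.foldl_append]
    rw [PySem.List.foldl_congr_mem (List.range L) _ (fun r (i : Nat) =>
        if PySem.List.pyGetD (natBits L (a / 2)) (i : Int) ' ' == PySem.List.pyGetD (natBits L (b / 2)) (i : Int) ' '
        then r ++ ['0'] else r ++ ['1']) []
      (fun acc x hx => by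
        rw [getD_natBits_lo L a x (List.mem_range.1 hx), getD_natBits_lo L b x (List.mem_range.1 hx)])]
    rw [ih (a / 2) (b / 2), ← xor_div_two]
    simp only [List.foldl_cons, List.foldl_nil]
    rw [getD_natBits_hi L a, getD_natBits_hi L b]
    show _ = natBits L ((a ^^^ b) / 2) ++ [if (a ^^^ b) % 2 = 1 then '1' else '0']
    rw [xor_mod_two a b]
    rcases Nat.mod_two_eq_zero_or_one a with ha | ha <;>
      rcases Nat.mod_two_eq_zero_or_one b with hb | hb <;> simp [ha, hb]

theorem cmp_fold (L a b : Nat) :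
    (PySem.List.pyRange 0 (L : Int) 1).foldl (fun r i =>
      if PySem.List.pyGetD (natBits L a) i ' ' == PySem.List.pyGetD (natBits L b) i ' '
      then r ++ ['0'] else r ++ ['1']) []
    = natBits L (a ^^^ b) := by
  rw [PySem.List.pyRange_zero_natCast, List.foldl_map]
  exact cmp_fold_nat L a b

theorem parse_natBits (L v : Nat) (h : v < 2 ^ L) :
    (natBits L v).foldl (fun a c => 2 * a + (if c == '1' then 1 else 0)) 0 = v := by
  induction L generalizing v with
  | zero =>
    have : v = 0 := by simpa using h
    simp [natBits, this]
  | succ L ih =>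
    show (natBits L (v / 2) ++ [if v % 2 = 1 then '1' else '0']).foldl _ 0 = v
    rw [List.foldl_append]
    rw [ih (v / 2) (by rw [pow_succ] at h; omega)]
    rcases Nat.mod_two_eq_zero_or_one v with hv | hv <;> simp [hv] <;> omega

theorem bin_xor_eq (c : Char) (k : Int) (hk : 0 ≤ k) :
    bin_xor c k = Char.ofNat ((PySem.Int.bxor (c.toNat : Int) k).toNat) := by
  obtain ⟨b, rfl⟩ : ∃ b : Nat, k = (b : Int) := ⟨k.toNat, (Int.toNat_of_nonneg hk).symm⟩
  obtain ⟨hsa, hba, hla⟩ := pvDigits_spec c.toNat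
  obtain ⟨hsb, hbb, hlb⟩ := pvDigits_spec b
  simp only [bin_xor, binSlice_nonneg]
  set a := c.toNat with ha
  set M := pvWhileFill 8 (max (pvDigits a).length (pvDigits b).length) 8 with hMdef
  have h1 : (pvDigits a).length ≤ M := le_trans (le_max_left _ _) (pvWhileFill_ge _ _ _)
  have h2 : (pvDigits b).length ≤ M := le_trans (le_max_right _ _) (pvWhileFill_ge _ _ _)
  have hfa : fillupbyte (pvDigits a) M '0' ['l'] = natBits M a := by
    rw [fillup_eq (pvDigits a) M hla h1, natBits_pad (pvDigits a).length M a hba h1, ← hsa]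
  have hfb : fillupbyte (pvDigits b) M '0' ['l'] = natBits M b := by
    rw [fillup_eq (pvDigits b) M hlb h2, natBits_pad (pvDigits b).length M b hbb h2, ← hsb]
  rw [hfa, hfb, cmp_fold M a b,
    parse_natBits M (a ^^^ b)
      (Nat.xor_lt_two_pow (lt_of_lt_of_le hba (Nat.pow_le_pow_right (by omega) h1))
        (lt_of_lt_of_le hbb (Nat.pow_le_pow_right (by omega) h2))),
    PySem.Int.bxor_natCast]
  simp

-- the two loop bodies, Nat-indexed (identical to the lambdas inside the two ports)
def stepA (ss : List Char) (mode : String) (st : List Char × Int) (i : Int) : List Char × Int :=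
  let result := st.1
  let k := st.2
  let k := if 0 < i ∧ (k = 0 ∨ k = 1) then
      (if mode == "encrypt" then ((PySem.List.pyGetD ss (i - 1) ' ').toNat : Int)
       else if mode == "decrypt" then ((PySem.List.pyGetD result (i - 1) ' ').toNat : Int)
       else k)
    else k
  if i = 0 then (result ++ [bin_xor (PySem.List.pyGetD ss i ' ') k], k)
  else
    let k := PySem.Int.mod (k * 2) 256
    (result ++ [bin_xor (PySem.List.pyGetD ss i ' ') k], k)

def stepB (ss : List Char) (mode : String) (st : List Char × Int) (p : Int × Char) : List Char × Int :=
  let out := st.1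
  let k := st.2
  let i := p.1
  let ch := p.2
  if i = 0 then
    (out ++ [Char.ofNat (PySem.Int.bxor (ch.toNat : Int) k).toNat], k)
  else
    let k := if k = 0 ∨ k = 1 then
        (if mode == "encrypt" then ((PySem.List.pyGetD ss (i - 1) ' ').toNat : Int)
         else if mode == "decrypt" then ((PySem.List.pyGetD out (i - 1) ' ').toNat : Int)
         else k)
      else k
    let k := PySem.Int.mod (k * 2) 256
    (out ++ [Char.ofNat (PySem.Int.bxor (ch.toNat : Int) k).toNat], k)

theorem loop_inv (ss : List Char) (mode : String) (k : Int) (hk : 0 ≤ k) (n : Nat) :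
    (((List.range n).foldl (fun st (i : Nat) => stepA ss mode st (i : Int)) ([], k)).1
      = ((List.range n).foldl (fun st (i : Nat) => stepB ss mode st ((i : Int), PySem.List.pyGetD ss (i : Int) ' ')) ([], k)).1) ∧
    (((List.range n).foldl (fun st (i : Nat) => stepA ss mode st (i : Int)) ([], k)).2
      = ((List.range n).foldl (fun st (i : Nat) => stepB ss mode st ((i : Int), PySem.List.pyGetD ss (i : Int) ' ')) ([], k)).2) ∧
    0 ≤ ((List.range n).foldl (fun st (i : Nat) => stepA ss mode st (i : Int)) ([], k)).2 := by
  induction n with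
  | zero => refine ⟨?_, ?_, ?_⟩ <;> simp [hk]
  | succ n ih =>
    obtain ⟨ih1, ih2, ih3⟩ := ih
    rw [List.range_succ, List.foldl_append, List.foldl_append]
    simp only [List.foldl_cons, List.foldl_nil]
    set SA := (List.range n).foldl (fun st (i : Nat) => stepA ss mode st (i : Int)) ([], k) with hSA
    set SB := (List.range n).foldl (fun st (i : Nat) => stepB ss mode st ((i : Int), PySem.List.pyGetD ss (i : Int) ' ')) ([], k) with hSB
    by_cases hn : n = 0
    · subst hn
      simp only [hSA, hSB, List.range_zero, List.foldl_nil]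
      simp [stepA, stepB, bin_xor_eq _ _ hk, hk]
    · have hi0 : ¬ ((n : Int) = 0) := by omega
      have hipos : (0 : Int) < (n : Int) := by omega
      simp only [stepA, stepB]
      rw [if_neg hi0, if_neg hi0]
      -- align the reset step
      have hreset : (if 0 < (n : Int) ∧ (SA.2 = 0 ∨ SA.2 = 1) then
            (if mode == "encrypt" then ((PySem.List.pyGetD ss ((n : Int) - 1) ' ').toNat : Int)
             else if mode == "decrypt" then ((PySem.List.pyGetD SA.1 ((n : Int) - 1) ' ').toNat : Int)
             else SA.2)
          else SA.2)
          = (if SB.2 = 0 ∨ SB.2 = 1 then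
            (if mode == "encrypt" then ((PySem.List.pyGetD ss ((n : Int) - 1) ' ').toNat : Int)
             else if mode == "decrypt" then ((PySem.List.pyGetD SB.1 ((n : Int) - 1) ' ').toNat : Int)
             else SB.2)
          else SB.2) := by
        rw [← ih1, ← ih2]
        by_cases hk01 : SA.2 = 0 ∨ SA.2 = 1
        · rw [if_pos ⟨hipos, hk01⟩, if_pos hk01]
        · rw [if_neg (by tauto), if_neg hk01]
      rw [← hreset]
      set k1 := (if 0 < (n : Int) ∧ (SA.2 = 0 ∨ SA.2 = 1) then
            (if mode == "encrypt" then ((PySem.List.pyGetD ss ((n : Int) - 1) ' ').toNat : Int)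
             else if mode == "decrypt" then ((PySem.List.pyGetD SA.1 ((n : Int) - 1) ' ').toNat : Int)
             else SA.2)
          else SA.2) with hk1
      have hmodpos : (0 : Int) < 256 := by norm_num
      refine ⟨?_, rfl, PySem.Int.mod_nonneg _ hmodpos⟩
      simp only [ih1]
      rw [bin_xor_eq _ _ (PySem.Int.mod_nonneg _ hmodpos)]

theorem main_eq (s : String) (k : Int) (mode : String) (hk : 0 ≤ k) :
    encrypt_with_mul2 s k mode = encrypt_with_mul2_alt s k mode := by
  have hA : encrypt_with_mul2 s k mode
      = String.ofList (((PySem.List.pyRange 0 (s.toList.length : Int) 1).foldl (stepA s.toList mode) ([], k)).1) := rfl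
  have hB : encrypt_with_mul2_alt s k mode
      = String.ofList (((PySem.List.enumerate s.toList).foldl (stepB s.toList mode) ([], k)).1) := rfl
  rw [hA, hB, PySem.List.enumerate_eq_map_pyRange s.toList ' ', List.foldl_map]
  have hlen : PySem.List.len s.toList = (s.toList.length : Int) := PySem.List.len_eq s.toList
  rw [hlen, PySem.List.pyRange_zero_natCast, List.foldl_map, List.foldl_map]
  exact congrArg String.ofList (loop_inv s.toList mode k hk s.toList.length).1

-- ===== VERDICT (by name: the statement is the Claim_ definition above) =====
theorem encrypt_with_mul2_spec : Claim_equal_encrypt_with_mul2 := by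
  intro s k mode _ hpre
  unfold Spec_encrypt_with_mul2
  exact main_eq s k mode hpre.1
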